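-- pv_equiv track=rewrite | github.com/Kyuwon53/Python-algorithm | programmers/Level2/영어 끝말잇기/Solution.py | solution
-- ===== SOURCE A (Python) =====
-- def solution(n, words):
--     used_words = [words[0]]
--
--     for word in words[1:]:
--         if has_word(word, used_words) or not is_match_word(used_words[-1], word):
--             break
--         else:
--             used_words.append(word)
--
--     game_round = len(used_words)
--
--     people = game_round % n + 1
--     order = game_round // n + 1
--
--     if game_round == len(words):
--         result = [0, 0]
--     else:
--         result = [people, order]
--     return result
--
-- def has_word(word, words):
--     if word in words:
--         return True
--     else:
--         return False
--
-- def is_match_word(target, current):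
--     if target[-1] == current[0]:
--         return True
--     else:
--         return False
-- ===== SOURCE B (Python) =====
-- def solution(n, words):
--     m = len(words)
--     idx_mismatch = m
--     for i in range(1, m):
--         if words[i][:1] != words[i - 1][-1:]:
--             idx_mismatch = i
--             break
--     idx_dup = m
--     seen = {words[0]}
--     for i in range(1, m):
--         if words[i] in seen:
--             idx_dup = i
--             break
--         seen.add(words[i])
--     fail = min(idx_mismatch, idx_dup)
--     if fail == m:
--         return [0, 0]
--     return [fail % n + 1, fail // n + 1]
-- ===== Notes on version B (the rewrite author's own statement) =====
-- stated objective: alternative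
-- what changed: A's single combined scan that grows a used-words list (with a linear membership check per word) is replaced by two independent first-failure scans - one for chain mismatches via slice comparison, one for duplicates via a set - whose minimum gives the failing round.
import Mathlib
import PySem

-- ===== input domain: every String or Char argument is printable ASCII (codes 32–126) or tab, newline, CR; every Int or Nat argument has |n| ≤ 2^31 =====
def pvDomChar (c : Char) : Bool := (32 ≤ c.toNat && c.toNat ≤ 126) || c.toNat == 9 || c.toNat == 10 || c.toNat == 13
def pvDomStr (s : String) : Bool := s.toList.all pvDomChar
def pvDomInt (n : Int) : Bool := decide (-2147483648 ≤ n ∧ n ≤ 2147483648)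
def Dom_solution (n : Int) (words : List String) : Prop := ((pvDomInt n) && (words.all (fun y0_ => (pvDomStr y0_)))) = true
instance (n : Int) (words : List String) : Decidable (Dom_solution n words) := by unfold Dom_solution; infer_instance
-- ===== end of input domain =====

-- B replaces A's single combined scan (growing used-words list with a linear dup check) by two
-- independent first-failure scans — chain mismatches, and duplicates via a set — joined with min.

-- ===== PORT A =====
def pyHasWord (word : String) (words : List String) : Bool :=
  if words.contains word then true else false

-- exact where both strings are nonempty (Python raises IndexError on ""; excluded by Pre_)
def pyIsMatchWord (target current : String) : Bool :=
  match PySem.Str.pyGet? target (-1), PySem.Str.pyGet? current 0 with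
  | some a, some b => if a == b then true else false
  | _, _ => false

def solutionLoop (used : List String) : List String → List String
  | [] => used
  | word :: rest =>
    if pyHasWord word used || !(pyIsMatchWord ((PySem.List.pyGet? used (-1)).getD "") word) then
      used
    else
      solutionLoop (used ++ [word]) rest

def solution (n : Int) (words : List String) : List Int :=
  let used := solutionLoop [(PySem.List.pyGet? words 0).getD ""] (PySem.List.slice words (some 1) none)
  let gameRound : Int := used.length
  let people := PySem.Int.mod gameRound n + 1
  let order := PySem.Int.floordiv gameRound n + 1
  if gameRound = (words.length : Int) then [0, 0] else [people, order]

-- ===== PORT B =====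
def bMismatchLoop (words : List String) : List Int → Int
  | [] => (words.length : Int)
  | i :: rest =>
    if PySem.Str.slice ((PySem.List.pyGet? words i).getD "") none (some 1) ≠
       PySem.Str.slice ((PySem.List.pyGet? words (i - 1)).getD "") (some (-1)) none then i
    else bMismatchLoop words rest

def bDupLoop (words : List String) (seen : PySem.Set String) : List Int → Int
  | [] => (words.length : Int)
  | i :: rest =>
    let w := (PySem.List.pyGet? words i).getD ""
    if PySem.Set.contains seen w then i
    else bDupLoop words (PySem.Set.add seen w) rest

def solution_alt (n : Int) (words : List String) : List Int :=
  let m : Int := words.length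
  let idxMismatch := bMismatchLoop words (PySem.List.pyRange 1 m 1)
  let idxDup := bDupLoop words (PySem.Set.ofList [(PySem.List.pyGet? words 0).getD ""]) (PySem.List.pyRange 1 m 1)
  let fail := min idxMismatch idxDup
  if fail = m then [0, 0]
  else [PySem.Int.mod fail n + 1, PySem.Int.floordiv fail n + 1]

-- ===== PRECONDITION & SPEC =====
-- word i extends the chain: not a duplicate, and its first char is word (i-1)'s last char
def chainOk (words : List String) (i : Nat) : Prop :=
  words.getD i "" ∉ words.take i ∧
    (words.getD i "").toList.head? = (words.getD (i - 1) "").toList.getLast?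

-- the game reaches an empty-string word in a match check (there Python A raises IndexError)
def reachesEmpty (words : List String) : Prop :=
  (2 ≤ words.length ∧ words.getD 0 "" = "" ∧ words.getD 1 "" ≠ "") ∨
  (∃ i < words.length, 1 ≤ i ∧ words.getD i "" = "" ∧ (∀ j < i, words.getD j "" ≠ "") ∧
    ∀ i' < i, 1 ≤ i' → chainOk words i')

-- Pre_ excludes exactly the inputs on which Python A raises: the empty word list (IndexError),
-- n = 0 (ZeroDivisionError), and lists where the game reaches an empty word (IndexError).
def Pre_solution (n : Int) (words : List String) : Prop :=
  words ≠ [] ∧ n ≠ 0 ∧ ¬ reachesEmpty words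
instance (n : Int) (words : List String) : Decidable (Pre_solution n words) := by
  unfold Pre_solution reachesEmpty chainOk; infer_instance

def pvWitness_solution : Int × List String := (3, ["ab", "ba", "ac"])

def Spec_solution (n : Int) (words : List String) (out : List Int) : Prop := out = solution_alt n words
instance (n : Int) (words : List String) (out : List Int) : Decidable (Spec_solution n words out) := by unfold Spec_solution; infer_instance

-- ===== CLAIM (what is proved, stated in full; the proofs are below) =====
def Claim_equal_solution : Prop := ∀ (n : Int) (words : List String), Dom_solution n words → Pre_solution n words → Spec_solution n words (solution n words)

-- ===== LEMMAS AND PROOFS =====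

-- the two ways round i of the game can fail (for 1 ≤ i < words.length, all words nonempty)
def badM (ws : List String) (i : Nat) : Bool :=
  !(pyIsMatchWord (ws.getD (i - 1) "") (ws.getD i ""))

def badD (ws : List String) (i : Nat) : Bool :=
  (ws.take i).contains (ws.getD i "")

-- first index in [k, m) satisfying p, else m
def firstFrom (m : Nat) (p : Nat → Bool) (k : Nat) : Nat :=
  if k < m then (if p k then k else firstFrom m p (k + 1)) else m
termination_by m - k

lemma firstFrom_unfold (m : Nat) (p : Nat → Bool) (k : Nat) :
    firstFrom m p k = if k < m then (if p k then k else firstFrom m p (k + 1)) else m := by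
  rw [firstFrom]

lemma le_firstFrom (m : Nat) (p : Nat → Bool) (k : Nat) : min k m ≤ firstFrom m p k := by
  fun_induction firstFrom m p k with
  | case1 k h hp => omega
  | case2 k h hp ih => omega
  | case3 k h => omega

lemma min_firstFrom (m : Nat) (p q : Nat → Bool) (k : Nat) :
    min (firstFrom m p k) (firstFrom m q k) = firstFrom m (fun i => p i || q i) k := by
  fun_induction firstFrom m (fun i => p i || q i) k with
  | case1 k h hpq =>
    simp only [Bool.or_eq_true_iff] at hpq
    rw [firstFrom_unfold m p k, firstFrom_unfold m q k]
    simp only [h, if_true]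
    rcases hpq with hp | hq
    · simp only [hp, if_true]
      split
      · omega
      · have := le_firstFrom m q (k + 1); omega
    · simp only [hq, if_true]
      split
      · omega
      · have := le_firstFrom m p (k + 1); omega
  | case2 k h hpq ih =>
    have hp : p k = false := by revert hpq; cases p k <;> cases q k <;> simp
    have hq : q k = false := by revert hpq; cases p k <;> cases q k <;> simp
    rw [firstFrom_unfold m p k, firstFrom_unfold m q k]
    simp only [h, if_true, hp, hq, Bool.false_eq_true, if_false]
    exact ih
  | case3 k h =>
    rw [firstFrom_unfold m p k, firstFrom_unfold m q k]
    simp [h]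

lemma take_getLast?_getD (ws : List String) (k : Nat) (h1 : 1 ≤ k) (hk : k ≤ ws.length) :
    ((ws.take k).getLast?).getD "" = ws.getD (k - 1) "" := by
  have hlen : (ws.take k).length = k := by simp [List.length_take]; omega
  rw [List.getLast?_eq_getElem?, hlen, List.getElem?_take_of_lt (by omega)]
  rw [List.getD_eq_getElem?_getD]

-- A's loop, started with the first k words consumed, stops at the first failing index
lemma aLoop_eq (ws : List String) (k : Nat) (h1 : 1 ≤ k) (hk : k ≤ ws.length) :
    (solutionLoop (ws.take k) (ws.drop k)).length
      = firstFrom ws.length (fun i => badD ws i || badM ws i) k := by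
  induction hn : ws.length - k generalizing k with
  | zero =>
    have hkm : k = ws.length := by omega
    rw [List.drop_eq_nil_of_le (by omega)]
    rw [solutionLoop, firstFrom_unfold]
    simp [hkm]
  | succ d ih =>
    have hklt : k < ws.length := by omega
    rw [List.drop_eq_getElem_cons hklt, solutionLoop]
    have hcond : (pyHasWord ws[k] (ws.take k)
        || !(pyIsMatchWord ((PySem.List.pyGet? (ws.take k) (-1)).getD "") ws[k]))
        = (badD ws k || badM ws k) := by
      rw [PySem.List.pyGet?_neg_one, take_getLast?_getD ws k h1 hk]
      simp [pyHasWord, badD, badM, List.getD_eq_getElem?_getD,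
        List.getElem?_eq_getElem hklt]
    rw [hcond, firstFrom_unfold]
    simp only [hklt, if_true]
    cases hbd : (badD ws k || badM ws k) with
    | true =>
      simp only [if_true]
      simp [List.length_take]; omega
    | false =>
      simp only [Bool.false_eq_true, if_false]
      have htake : ws.take k ++ [ws[k]] = ws.take (k + 1) := by
        rw [List.take_add_one, List.getElem?_eq_getElem hklt]
        rfl
      rw [htake]
      exact ih (k + 1) (by omega) (by omega) (by omega)

lemma pyIsMatchWord_eq (t c : String) (a b : Char) (ha : PySem.Str.pyGet? t (-1) = some a)
    (hb : PySem.Str.pyGet? c 0 = some b) : pyIsMatchWord t c = (a == b) := by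
  unfold pyIsMatchWord
  split
  · rename_i x y hx hy
    rw [ha] at hx; rw [hb] at hy
    cases hx; cases hy
    by_cases h : a = b <;> simp [h]
  · rename_i h
    exact absurd (h a b ha hb) (by simp)

-- B's mismatch test at index i, as a predicate on the list
def badMB (ws : List String) (i : Nat) : Bool :=
  decide ¬(PySem.Str.slice (ws.getD i "") none (some 1)
    = PySem.Str.slice (ws.getD (i - 1) "") (some (-1)) none)

lemma slice_toList_head (s : String) :
    (PySem.Str.slice s none (some 1)).toList = s.toList.take 1 := by
  simp [pysem]

lemma slice_toList_last (s : String) :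
    (PySem.Str.slice s (some (-1)) none).toList = s.toList.drop (s.toList.length - 1) := by
  simp [pysem, PySem.List.slice_from_neg_one]

-- where A's test and B's test disagree (two adjacent empty words), the duplicate test fires
lemma bad_pointwise (ws : List String) (i : Nat) (h1 : 1 ≤ i) (hi : i < ws.length) :
    (badD ws i || badMB ws i) = (badD ws i || badM ws i) := by
  have hi1 : i - 1 < ws.length := by omega
  have e2 : ws.getD i "" = ws[i] := by simp [List.getD, List.getElem?_eq_getElem hi]
  have e1 : ws.getD (i - 1) "" = ws[i - 1] := by simp [List.getD, List.getElem?_eq_getElem hi1]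
  have hMB : badMB ws i
      = decide ¬(ws[i].toList.take 1 = ws[i-1].toList.drop (ws[i-1].toList.length - 1)) := by
    rw [badMB, e1, e2]
    rw [Bool.eq_iff_iff]
    simp only [decide_eq_true_eq, not_iff_not]
    rw [← String.toList_inj, slice_toList_head, slice_toList_last]
  cases hc : ws[i].toList with
  | nil =>
    cases hp : ws[i-1].toList with
    | nil =>
      -- both empty: mismatch test disagrees but the duplicate test fires on both sides
      have hdup : badD ws i = true := by
        rw [badD, e2]
        rw [List.contains_iff_mem]
        have hcc : ws[i] = ws[i-1] := by rw [← String.toList_inj, hc, hp]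
        rw [hcc]
        have : (ws.take i)[i-1]'(by simp [List.length_take]; omega) = ws[i-1] := by
          simp [List.getElem_take]
        rw [← this]
        exact List.getElem_mem _
      simp [hdup]
    | cons a as =>
      have hm : badM ws i = true := by
        rw [badM, e1, e2]
        unfold pyIsMatchWord
        have : PySem.Str.pyGet? ws[i] 0 = none := by simp [pysem, hc]
        split
        · rename_i x y hx hy; rw [this] at hy; cases hy
        · rfl
      have hmb : badMB ws i = true := by
        rw [hMB, hc, hp]
        simp
      rw [hm, hmb]
  | cons b bs =>
    cases hp : ws[i-1].toList with
    | nil =>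
      have hm : badM ws i = true := by
        rw [badM, e1, e2]
        unfold pyIsMatchWord
        have : PySem.Str.pyGet? ws[i-1] (-1) = none := by
          simp [pysem, PySem.List.pyGet?_neg_one, hp]
        split
        · rename_i x y hx hy; rw [this] at hx; cases hx
        · rfl
      have hmb : badMB ws i = true := by
        rw [hMB, hc, hp]
        simp
      rw [hm, hmb]
    | cons a as =>
      have hlast : ws[i-1].toList.drop (ws[i-1].toList.length - 1)
          = [ws[i-1].toList.getLast (by simp [hp])] :=
        List.drop_length_sub_one (by simp [hp])
      have hb0 : PySem.Str.pyGet? ws[i] 0 = some b := by simp [pysem, hc]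
      have hal : PySem.Str.pyGet? ws[i-1] (-1)
          = some (ws[i-1].toList.getLast (by simp [hp])) := by
        simp [pysem, PySem.List.pyGet?_neg_one]
        exact List.getLast?_eq_some_getLast _
      have hm : badM ws i = !((ws[i-1].toList.getLast (by simp [hp])) == b) := by
        rw [badM, e1, e2, pyIsMatchWord_eq _ _ _ _ hal hb0]
      have hmb : badMB ws i = !((ws[i-1].toList.getLast (by simp [hp])) == b) := by
        rw [hMB, hc, hlast]
        by_cases h : ws[i-1].toList.getLast (by simp [hp]) = b
        · simp [h]
        · have h2 : ¬ b = ws[i-1].toList.getLast (by simp [hp]) := fun hh => h hh.symm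
          simp [h, h2]
      rw [hm, hmb]

lemma firstFrom_congr (m : Nat) (p q : Nat → Bool) (k : Nat)
    (h : ∀ i, k ≤ i → i < m → p i = q i) : firstFrom m p k = firstFrom m q k := by
  induction hn : m - k generalizing k with
  | zero =>
    rw [firstFrom_unfold m p k, firstFrom_unfold m q k]
    have : ¬ k < m := by omega
    simp [this]
  | succ d ih =>
    have hk : k < m := by omega
    rw [firstFrom_unfold m p k, firstFrom_unfold m q k]
    simp only [hk, if_true, h k (le_refl k) hk]
    cases hq : q k with
    | true => simp
    | false =>
      simp only [Bool.false_eq_true, if_false]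
      exact ih (k + 1) (fun i hi1 hi2 => h i (by omega) hi2) (by omega)

-- B's mismatch loop over range(k, m) finds the first mismatch index
lemma bM_eq (ws : List String) (k : Nat) (h1 : 1 ≤ k) (hk : k ≤ ws.length) :
    bMismatchLoop ws (PySem.List.pyRange (k : Int) (ws.length : Int) 1)
      = ((firstFrom ws.length (badMB ws) k : Nat) : Int) := by
  induction hn : ws.length - k generalizing k with
  | zero =>
    rw [PySem.List.pyRange_one_eq_nil (by omega), bMismatchLoop, firstFrom_unfold]
    simp; omega
  | succ d ih =>
    have hklt : k < ws.length := by omega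
    have hk1 : k - 1 < ws.length := by omega
    rw [PySem.List.pyRange_one_cons (by exact_mod_cast hklt), bMismatchLoop]
    have hgk : (PySem.List.pyGet? ws (k : Int)).getD "" = ws[k] := by
      simp [pysem, List.getElem?_eq_getElem hklt]
    have hgk1 : (PySem.List.pyGet? ws ((k : Int) - 1)).getD "" = ws[k - 1] := by
      rw [show ((k : Int) - 1) = ((k - 1 : Nat) : Int) by omega]
      simp [pysem, List.getElem?_eq_getElem hk1]
    have e1 : ws.getD (k - 1) "" = ws[k - 1] := by
      simp [List.getD, List.getElem?_eq_getElem hk1]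
    have e2 : ws.getD k "" = ws[k] := by
      simp [List.getD, List.getElem?_eq_getElem hklt]
    have hbadMB : badMB ws k = decide ¬(PySem.Str.slice ws[k] none (some 1)
        = PySem.Str.slice ws[k - 1] (some (-1)) none) := by
      rw [badMB, e1, e2]
    rw [show ((k : Int) + 1) = ((k + 1 : Nat) : Int) by omega]
    rw [firstFrom_unfold]
    simp only [hklt, if_true]
    by_cases hbd : PySem.Str.slice ((PySem.List.pyGet? ws (k : Int)).getD "") none (some 1) ≠
        PySem.Str.slice ((PySem.List.pyGet? ws ((k : Int) - 1)).getD "") (some (-1)) none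
    · rw [if_pos hbd]
      rw [hgk, hgk1] at hbd
      have : badMB ws k = true := by rw [hbadMB]; simpa using hbd
      rw [this, if_pos rfl]
    · rw [if_neg hbd]
      rw [hgk, hgk1] at hbd
      have : badMB ws k = false := by rw [hbadMB]; simpa using hbd
      rw [this]
      simp only [Bool.false_eq_true, if_false]
      exact ih (k + 1) (by omega) (by omega) (by omega)

-- B's duplicate loop over range(k, m), with `seen` holding the first k words, finds the first dup
lemma bD_eq (ws : List String) (k : Nat) (h1 : 1 ≤ k) (hk : k ≤ ws.length)
    (seen : PySem.Set String) (hseen : ∀ x, x ∈ seen ↔ x ∈ ws.take k) :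
    bDupLoop ws seen (PySem.List.pyRange (k : Int) (ws.length : Int) 1)
      = ((firstFrom ws.length (badD ws) k : Nat) : Int) := by
  induction hn : ws.length - k generalizing k seen with
  | zero =>
    rw [PySem.List.pyRange_one_eq_nil (by omega), bDupLoop, firstFrom_unfold]
    simp; omega
  | succ d ih =>
    have hklt : k < ws.length := by omega
    rw [PySem.List.pyRange_one_cons (by exact_mod_cast hklt), bDupLoop]
    have hgk : (PySem.List.pyGet? ws (k : Int)).getD "" = ws[k] := by
      simp [pysem, List.getElem?_eq_getElem hklt]
    have e2 : ws.getD k "" = ws[k] := by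
      simp [List.getD, List.getElem?_eq_getElem hklt]
    have hcont : PySem.Set.contains seen ((PySem.List.pyGet? ws (k : Int)).getD "") = badD ws k := by
      rw [hgk, badD, e2]
      simp only [PySem.Set.contains]
      rw [Bool.eq_iff_iff]
      simp only [List.contains_iff_mem]
      exact hseen _
    rw [show ((k : Int) + 1) = ((k + 1 : Nat) : Int) by omega]
    rw [firstFrom_unfold]
    simp only [hklt, if_true, hcont]
    cases hbd : badD ws k with
    | true => simp
    | false =>
      simp only [Bool.false_eq_true, if_false]
      refine ih (k + 1) (by omega) (by omega) _ ?_ (by omega)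
      intro x
      rw [PySem.Set.mem_add]
      rw [hseen x, hgk]
      rw [List.take_add_one, List.getElem?_eq_getElem hklt]
      simp only [Option.toList_some, List.mem_append, List.mem_singleton]

-- ===== VERDICT (by name: the statement is the Claim_ definition above) =====
theorem solution_spec : Claim_equal_solution := by
  intro n words _ hpre
  obtain ⟨hne, hn0, -⟩ := hpre
  unfold Spec_solution
  have hlen : 0 < words.length := List.length_pos_iff.mpr hne
  have h0 : (PySem.List.pyGet? words 0).getD "" = words[0] := by
    simp [pysem, List.getElem?_eq_getElem hlen]
  have htake1 : words.take 1 = [words[0]] := by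
    cases words with
    | nil => exact absurd rfl hne
    | cons a t => simp
  have hslice : PySem.List.slice words (some 1) none = words.drop 1 := by
    rw [List.drop_one]; simp [pysem]
  have hm := bM_eq words 1 (le_refl 1) hlen
  have hd := bD_eq words 1 (le_refl 1) hlen (PySem.Set.ofList [words[0]]) (by
    intro x
    rw [htake1]
    simp [PySem.Set.mem_ofList])
  simp only [Nat.cast_one] at hm hd
  simp only [solution, solution_alt]
  rw [h0, ← htake1, hslice,
    aLoop_eq words 1 (le_refl 1) hlen, htake1, hm, hd]
  rw [← Nat.cast_min, min_firstFrom]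
  have hcomm : (fun i => badMB words i || badD words i) = (fun i => badD words i || badMB words i) := by
    funext i; exact Bool.or_comm _ _
  rw [hcomm, firstFrom_congr words.length _ _ 1
    (fun i hi1 hi2 => bad_pointwise words i hi1 hi2)]
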